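-- pv_equiv track=rewrite | github.com/daiyizheng/liyi-cute | liyi_cute/utils/common.py | is_cut_number
-- ===== SOURCE A (Python) =====
-- from collections import OrderedDict
-- from typing import Union, Optional, Dict, Text, Any, List, Coroutine, TypeVar, Set, Tuple
--
-- def is_cut_number(ids:List[Text]
--                   ) -> Tuple[List[str], List[int]]:
--     ex_dict = OrderedDict()
--     for id in ids:
--         if id in ex_dict:
--             ex_dict[id] += 1
--         else:
--             ex_dict[id] = 1
--     return list(ex_dict.keys()), list(ex_dict.values())
-- ===== SOURCE B (Python) =====
-- def is_cut_number(ids):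
--     keys, vals = [], []
--     rest = ids
--     while rest:
--         k = rest[0]
--         nxt = [x for x in rest if x != k]
--         keys.append(k)
--         vals.append(len(rest) - len(nxt))
--         rest = nxt
--     return keys, vals
-- ===== Notes on version B (the rewrite author's own statement) =====
-- stated objective: alternative
-- what changed: Replaces A's single accumulating OrderedDict pass with an iterative partition worklist: repeatedly take the first id of the remaining list, read its count off the length drop after filtering out all its occurrences, and continue on the filtered remainder; no dict is maintained.
import Mathlib
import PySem

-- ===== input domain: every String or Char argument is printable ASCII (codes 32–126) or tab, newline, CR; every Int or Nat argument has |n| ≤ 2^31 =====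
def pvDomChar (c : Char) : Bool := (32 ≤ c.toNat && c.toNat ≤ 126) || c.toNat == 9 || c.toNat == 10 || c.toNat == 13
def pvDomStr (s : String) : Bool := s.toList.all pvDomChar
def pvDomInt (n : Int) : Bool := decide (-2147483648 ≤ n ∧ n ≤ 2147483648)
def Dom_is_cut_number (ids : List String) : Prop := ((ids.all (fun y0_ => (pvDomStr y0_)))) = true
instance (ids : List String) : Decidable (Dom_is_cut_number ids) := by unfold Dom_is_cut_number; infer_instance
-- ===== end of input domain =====

-- B replaces A's single accumulating OrderedDict pass with an iterative partition
-- worklist: repeatedly take the first id of the remaining list, read its count off the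
-- length drop after filtering out all its occurrences, and continue on the remainder
-- (no dict maintained; slower on large inputs, O(n*k) vs A's O(n)).

-- ===== PORT A =====
def is_cut_number (ids : List String) : List String × List Int :=
  let ex_dict := ids.foldl (fun d id =>
    if (d.get? id).isSome then d.insert id (d.getD id 0 + 1)  -- ex_dict[id] += 1
    else d.insert id 1) (PySem.Dict.empty : PySem.Dict String Int)
  (ex_dict.keys, ex_dict.values)

-- ===== PORT B =====
-- the while loop: state (rest, keys, vals); one iteration peels off all copies of rest[0]
def pvLoopB : List String → List String → List Int → List String × List Int
  | [], keys, vals => (keys, vals)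
  | k :: t, keys, vals =>
    let nxt := (k :: t).filter (fun x => x != k)   -- [x for x in rest if x != k]
    pvLoopB nxt (keys ++ [k]) (vals ++ [((k :: t).length : Int) - (nxt.length : Int)])
termination_by rest _ _ => rest.length
decreasing_by
  simp only [List.filter_cons, bne_self_eq_false, Bool.false_eq_true, if_false,
    List.length_cons]
  have := List.length_filter_le (fun x => x != k) t
  omega

def is_cut_number_alt (ids : List String) : List String × List Int :=
  pvLoopB ids [] []

-- ===== PRECONDITION & SPEC =====
def Spec_is_cut_number (ids : List String) (out : List String × List Int) : Prop := out = is_cut_number_alt ids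
instance (ids : List String) (out : List String × List Int) : Decidable (Spec_is_cut_number ids out) := by unfold Spec_is_cut_number; infer_instance

-- ===== CLAIM (what is proved, stated in full; the proofs are below) =====
def Claim_equal_is_cut_number : Prop := ∀ (ids : List String), Dom_is_cut_number ids → Spec_is_cut_number ids (is_cut_number ids)

-- ===== LEMMAS AND PROOFS =====

-- A's fold step is exactly the counter step of PySem.Dict.counter
theorem pv_fold_eq_counter (ids : List String) :
    ids.foldl (fun d id =>
      if (d.get? id).isSome then d.insert id (d.getD id 0 + 1)
      else d.insert id 1) (PySem.Dict.empty : PySem.Dict String Int)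
    = PySem.Dict.counter ids := by
  unfold PySem.Dict.counter
  congr 1
  funext d x
  by_cases h : (d.get? x).isSome
  · simp [PySem.Dict.modify, PySem.Dict.getD, h]
  · rw [Option.not_isSome_iff_eq_none] at h
    simp [PySem.Dict.modify, PySem.Dict.getD, h]

-- both sides are characterised against this closed form
def pvSpecForm (ids : List String) : List String × List Int :=
  (PySem.Set.ofList ids, (PySem.Set.ofList ids).map (fun k => (ids.count k : Int)))

theorem pvA_eq_form (ids : List String) : is_cut_number ids = pvSpecForm ids := by
  unfold is_cut_number pvSpecForm
  simp only [pv_fold_eq_counter]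
  refine Prod.ext ?_ ?_
  · exact PySem.Dict.keys_counter ids
  · show (PySem.Dict.counter ids).items.map Prod.snd = _
    rw [PySem.Dict.items_counter]
    simp [List.map_map, Function.comp]

-- folding Set.add from a seed whose head is absent from the list peels the head off
theorem pv_foldl_add_cons {α : Type} [BEq α] [LawfulBEq α] (k : α) :
    ∀ (l s : List α), k ∉ l →
      l.foldl PySem.Set.add (k :: s) = k :: l.foldl PySem.Set.add s := by
  intro l
  induction l with
  | nil => intro s _; rfl
  | cons x t ih =>
    intro s hk
    have hxk : x ≠ k := fun h => hk (h ▸ List.mem_cons_self)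
    have hkt : k ∉ t := fun h => hk (List.mem_cons_of_mem _ h)
    have hstep : PySem.Set.add (k :: s) x = k :: PySem.Set.add s x := by
      simp only [PySem.Set.add, PySem.Set.contains, List.contains_cons,
        beq_eq_false_iff_ne.mpr hxk, Bool.false_or]
      split <;> simp
    simp only [List.foldl_cons, hstep, ih _ hkt]

-- appending elements already seen (equal to k, with k in the seed) changes nothing
theorem pv_foldl_add_filter {α : Type} [BEq α] [LawfulBEq α] (k : α) :
    ∀ (l s : List α), k ∈ s →
      l.foldl PySem.Set.add s = (l.filter (fun x => x != k)).foldl PySem.Set.add s := by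
  intro l
  induction l with
  | nil => intro s _; rfl
  | cons x t ih =>
    intro s hk
    by_cases hx : x = k
    · subst hx
      have : PySem.Set.add s x = s := by
        simp [PySem.Set.add, PySem.Set.contains, hk]
      simp only [List.foldl_cons, List.filter_cons, bne_self_eq_false, this]
      exact ih s hk
    · have hmem : k ∈ PySem.Set.add s x := by
        rw [PySem.Set.mem_add]; exact Or.inl hk
      rw [List.foldl_cons, List.filter_cons,
        if_pos (by simp [hx] : (x != k) = true), List.foldl_cons]
      exact ih _ hmem

-- the first-seen-order distinct keys of k :: t: k, then those of t with k removed
theorem pv_ofList_cons (k : String) (t : List String) :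
    PySem.Set.ofList (k :: t) = k :: PySem.Set.ofList (t.filter (fun x => x != k)) := by
  rw [PySem.Set.ofList_eq_foldl, PySem.Set.ofList_eq_foldl]
  show t.foldl PySem.Set.add (PySem.Set.add [] k) = _
  have h1 : PySem.Set.add ([] : List String) k = [k] := rfl
  rw [h1, pv_foldl_add_filter k t [k] List.mem_cons_self,
    pv_foldl_add_cons k _ []
      (fun h => by simpa using (List.of_mem_filter h))]

theorem pvLoopB_eq_form : ∀ (ids keys : List String) (vals : List Int),
    pvLoopB ids keys vals = (keys ++ (pvSpecForm ids).1, vals ++ (pvSpecForm ids).2) := by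
  intro ids
  induction hn : ids.length using Nat.strong_induction_on generalizing ids with
  | _ n ih =>
    match ids with
    | [] => intro keys vals; simp only [pvLoopB]; simp [pvSpecForm]
    | k :: t =>
      intro keys vals
      rw [show pvLoopB (k :: t) keys vals = _ from by
        conv_lhs => rw [pvLoopB]]
      have hrest : (k :: t).filter (fun x => x != k) = t.filter (fun x => x != k) := by
        simp
      have hlen : (t.filter (fun x => x != k)).length < n := by
        have := List.length_filter_le (fun x => x != k) t
        simp at hn; omega
      rw [hrest, ih _ hlen _ rfl]
      unfold pvSpecForm
      rw [pv_ofList_cons k t]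
      refine Prod.ext ?_ ?_
      · simp
      · show (_ ++ _) ++ _ = _ ++ (_ :: _)
        rw [List.append_assoc, List.singleton_append]
        refine congrArg (vals ++ ·) ?_
        refine List.cons_eq_cons.mpr ⟨?_, ?_⟩
        · -- len(ids) - len(rest) = count of k in k :: t
          have hsplit : t.length = (t.filter (fun x => x != k)).length + t.count k := by
            have h := List.length_eq_countP_add_countP (fun x => x != k) (l := t)
            rw [List.countP_eq_length_filter] at h
            have hc : List.countP (fun a => decide ¬((a != k) = true)) t = t.count k := by
              unfold List.count
              apply List.countP_congr
              intro a _
              simp [bne]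
            rw [hc] at h
            omega
          simp only [List.length_cons, List.count_cons_self]
          push_cast [hsplit]
          ring
        · apply List.map_congr_left
          intro x hx
          have hxk : x ≠ k := by
            have := (PySem.Set.mem_ofList _ _).mp hx
            simpa using (List.of_mem_filter this)
          congr 1
          rw [List.count_cons_of_ne (Ne.symm hxk), List.count_filter (by simp [hxk])]

-- ===== VERDICT (by name: the statement is the Claim_ definition above) =====
theorem is_cut_number_spec : Claim_equal_is_cut_number := by
  intro ids _
  unfold Spec_is_cut_number
  rw [pvA_eq_form]
  show pvSpecForm ids = pvLoopB ids [] []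
  rw [pvLoopB_eq_form ids [] []]
  simp
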